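-- pv_equiv track=rewrite | github.com/NicoGG011/Heuristicas | Algoritmos_Recursivos.py | Algoritmo
-- ===== SOURCE A (Python) =====
-- def Algoritmo(A, k):
--     l = 0
--     p = 0
--     capturas = 0
--     Ladron = []
--     Policia = []
--
--     # Almacenar indices
--     for i in range(len(A)):
--         if A[i] == 'P':
--             Policia.append(i)
--         elif A[i] == 'L':
--             Ladron.append(i)
--
--             # Buscar los indices actuales mas bajos
--     while l < len(Ladron) and p < len(Policia):
--         if abs(Ladron[l] - Policia[p]) <= k:
--             capturas += 1
--             l += 1
--             p += 1
--
--         elif Ladron[l] < Policia[p]: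
--             l += 1
--         else:
--             p += 1
--
--     return capturas
-- ===== SOURCE B (Python) =====
-- def Algoritmo(A, k):
--     # Single streaming pass: two FIFO queues of still-pending cop/thief
--     # indices; purge out-of-range fronts, match greedily.
--     cops = []
--     thieves = []
--     capturas = 0
--     for i, ch in enumerate(A):
--         if ch == 'P':
--             while thieves and thieves[0] < i - k:
--                 thieves.pop(0)
--             if thieves:
--                 thieves.pop(0)
--                 capturas += 1
--             else:
--                 cops.append(i)
--         elif ch == 'L':
--             while cops and cops[0] < i - k:
--                 cops.pop(0)
--             if cops:
--                 cops.pop(0)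
--                 capturas += 1
--             else:
--                 thieves.append(i)
--     return capturas
-- ===== Notes on version B (the rewrite author's own statement) =====
-- stated objective: alternative
-- what changed: Replaces A's two phases (build the two full index lists, then a two-pointer sweep) by a single streaming pass over the string that maintains two FIFO queues of still-reachable cop/thief indices, purging out-of-range fronts and matching greedily on the fly.
import Mathlib
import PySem

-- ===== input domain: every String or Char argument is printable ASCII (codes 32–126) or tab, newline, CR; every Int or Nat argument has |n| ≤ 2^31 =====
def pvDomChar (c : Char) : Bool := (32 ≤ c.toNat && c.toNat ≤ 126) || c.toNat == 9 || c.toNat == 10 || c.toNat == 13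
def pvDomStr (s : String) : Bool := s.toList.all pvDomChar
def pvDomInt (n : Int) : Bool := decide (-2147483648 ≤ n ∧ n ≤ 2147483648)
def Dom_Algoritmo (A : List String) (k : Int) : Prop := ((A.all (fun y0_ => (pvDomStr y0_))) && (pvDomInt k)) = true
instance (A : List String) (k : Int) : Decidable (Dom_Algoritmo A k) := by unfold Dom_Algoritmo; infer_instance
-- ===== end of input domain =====

-- B replaces A's build-two-index-lists-then-two-pointer scheme by one streaming pass
-- over the string that maintains two FIFO queues of still-reachable cop/thief indices
-- (alternative decomposition, same asymptotic cost).

-- ===== PORT A =====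
-- the for-loop over range(len(A)) reading A[i] is rendered as a fold over
-- enumerate(A), which yields exactly the same (i, A[i]) pairs in the same order
def pvIdxStep (st : List Int × List Int) (pr : Int × String) : List Int × List Int :=
  if pr.2 = "P" then (st.1 ++ [pr.1], st.2)
  else if pr.2 = "L" then (st.1, st.2 ++ [pr.1])
  else st

-- the while loop with cursors l, p into Ladron/Policia; fuel is only a
-- totality guard (the measure (|Lad|-l)+(|Pol|-p) strictly decreases, so the
-- initial fuel |Lad|+|Pol| is never exhausted)
def AlgoritmoLoop (k : Int) (Lad Pol : List Int) (fuel : Nat) (l p : Nat) (capturas : Int) : Int :=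
  match fuel with
  | 0 => capturas
  | fuel + 1 =>
    if h : l < Lad.length ∧ p < Pol.length then
      if |Lad[l] - Pol[p]| ≤ k then AlgoritmoLoop k Lad Pol fuel (l+1) (p+1) (capturas+1)
      else if Lad[l] < Pol[p] then AlgoritmoLoop k Lad Pol fuel (l+1) p capturas
      else AlgoritmoLoop k Lad Pol fuel l (p+1) capturas
    else capturas

def Algoritmo (A : List String) (k : Int) : Int :=
  let st := (PySem.List.enumerate A 0).foldl pvIdxStep ([], [])
  AlgoritmoLoop k st.2 st.1 (st.2.length + st.1.length) 0 0 0

-- ===== PORT B =====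
-- pop out-of-range entries from the front of a queue (the inner while loops of B)
def pvPurge (b : Int) : List Int → List Int
  | [] => []
  | x :: xs => if x < b then pvPurge b xs else x :: xs

-- one iteration of B's for loop; state = (cops, thieves, capturas)
def pvStep (k : Int) (st : List Int × List Int × Int) (pr : Int × String) :
    List Int × List Int × Int :=
  if pr.2 = "P" then
    match pvPurge (pr.1 - k) st.2.1 with
    | [] => (st.1 ++ [pr.1], [], st.2.2)
    | _ :: rest => (st.1, rest, st.2.2 + 1)
  else if pr.2 = "L" then
    match pvPurge (pr.1 - k) st.1 with
    | [] => ([], st.2.1 ++ [pr.1], st.2.2)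
    | _ :: rest => (rest, st.2.1, st.2.2 + 1)
  else st

def Algoritmo_alt (A : List String) (k : Int) : Int :=
  ((PySem.List.enumerate A 0).foldl (pvStep k) ([], [], 0)).2.2

-- ===== PRECONDITION & SPEC =====
def Spec_Algoritmo (A : List String) (k : Int) (out : Int) : Prop := out = Algoritmo_alt A k
instance (A : List String) (k : Int) (out : Int) : Decidable (Spec_Algoritmo A k out) := by unfold Spec_Algoritmo; infer_instance

-- ===== CLAIM (what is proved, stated in full; the proofs are below) =====
def Claim_equal_Algoritmo : Prop := ∀ (A : List String) (k : Int), Dom_Algoritmo A k → Spec_Algoritmo A k (Algoritmo A k)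

-- ===== LEMMAS AND PROOFS =====

-- abstract two-pointer match count on the (sorted) thief and cop index lists
def pvTp (k : Int) : List Int → List Int → Int
  | [], _ => 0
  | _ :: _, [] => 0
  | a :: L, b :: P =>
    if |a - b| ≤ k then 1 + pvTp k L P
    else if a < b then pvTp k L (b :: P)
    else pvTp k (a :: L) P
termination_by L P => L.length + P.length

def pvPF (E : List (Int × String)) : List Int :=
  E.filterMap (fun p => if p.2 = "P" then some p.1 else none)
def pvLF (E : List (Int × String)) : List Int :=
  E.filterMap (fun p => if p.2 = "L" then some p.1 else none)

theorem pvTp_nil_right (k : Int) (L : List Int) : pvTp k L [] = 0 := by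
  cases L <;> simp [pvTp]

theorem pvLoop_eq_tp (k : Int) (Lad Pol : List Int) (fuel : Nat) :
    ∀ (l p : Nat) (c : Int), (Lad.length - l) + (Pol.length - p) ≤ fuel →
    AlgoritmoLoop k Lad Pol fuel l p c = c + pvTp k (Lad.drop l) (Pol.drop p) := by
  induction fuel with
  | zero =>
    intro l p c hf
    have h1 : Lad.length ≤ l := by omega
    rw [AlgoritmoLoop, List.drop_eq_nil_of_le h1]
    simp [pvTp]
  | succ fuel ih =>
    intro l p c hf
    by_cases h : l < Lad.length ∧ p < Pol.length
    · rw [AlgoritmoLoop]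
      rw [dif_pos h, List.drop_eq_getElem_cons h.1, List.drop_eq_getElem_cons h.2, pvTp]
      by_cases h1 : |Lad[l] - Pol[p]| ≤ k
      · rw [if_pos h1, if_pos h1, ih (l+1) (p+1) (c+1) (by omega)]; ring
      · rw [if_neg h1, if_neg h1]
        by_cases h2 : Lad[l] < Pol[p]
        · rw [if_pos h2, if_pos h2, ih (l+1) p c (by omega),
            List.drop_eq_getElem_cons h.2]
        · rw [if_neg h2, if_neg h2, ih l (p+1) c (by omega),
            List.drop_eq_getElem_cons h.1]
    · rw [AlgoritmoLoop, dif_neg h]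
      rcases Nat.lt_or_ge l Lad.length with h1 | h1
      · have h2 : Pol.length ≤ p := by omega
        rw [List.drop_eq_nil_of_le h2, pvTp_nil_right]; ring
      · rw [List.drop_eq_nil_of_le h1]; simp [pvTp]

theorem pvPhase1 (E : List (Int × String)) (P0 L0 : List Int) :
    E.foldl pvIdxStep (P0, L0) = (P0 ++ pvPF E, L0 ++ pvLF E) := by
  induction E generalizing P0 L0 with
  | nil => simp [pvPF, pvLF]
  | cons e E ih =>
    by_cases hP : e.2 = "P"
    · simp [pvIdxStep, hP, pvPF, pvLF, ih]
    · by_cases hL : e.2 = "L" <;> simp [pvIdxStep, hP, hL, pvPF, pvLF, ih]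

theorem pvPurge_mem {b x : Int} {q : List Int} (h : x ∈ pvPurge b q) : x ∈ q := by
  induction q with
  | nil => simp [pvPurge] at h
  | cons a q ih =>
    by_cases ha : a < b
    · simp only [pvPurge, if_pos ha] at h; exact List.mem_cons_of_mem _ (ih h)
    · simpa [pvPurge, ha] using h

theorem pvPurge_head_ge {b a : Int} {q rest : List Int} (h : pvPurge b q = a :: rest) :
    ¬ a < b := by
  induction q with
  | nil => simp [pvPurge] at h
  | cons x q ih =>
    by_cases hx : x < b
    · exact ih (by simpa [pvPurge, hx] using h)
    · simp only [pvPurge, if_neg hx] at h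
      cases h; exact hx

theorem pvPurgeL (i k : Int) (ql L P : List Int) (hlt : ∀ x ∈ ql, x < i) :
    pvTp k (ql ++ L) (i :: P) = pvTp k (pvPurge (i - k) ql ++ L) (i :: P) := by
  induction ql with
  | nil => simp [pvPurge]
  | cons d ql ih =>
    by_cases hd : d < i - k
    · have hdi : d < i := hlt d (by simp)
      have habs : ¬ |d - i| ≤ k := by rw [abs_sub_comm, abs_of_pos (by omega)]; omega
      simp only [List.cons_append, pvTp, if_neg habs, if_pos hdi, pvPurge, if_pos hd]
      exact ih (fun x hx => hlt x (List.mem_cons_of_mem _ hx))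
    · simp [pvPurge, hd]

theorem pvPurgeP (i k : Int) (qp L P : List Int) (hlt : ∀ x ∈ qp, x < i) :
    pvTp k (i :: L) (qp ++ P) = pvTp k (i :: L) (pvPurge (i - k) qp ++ P) := by
  induction qp with
  | nil => simp [pvPurge]
  | cons b qp ih =>
    by_cases hb : b < i - k
    · have hbi : b < i := hlt b (by simp)
      have habs : ¬ |i - b| ≤ k := by rw [abs_of_pos (by omega)]; omega
      simp only [List.cons_append, pvTp, if_neg habs, if_neg (by omega : ¬ i < b),
        pvPurge, if_pos hb]
      exact ih (fun x hx => hlt x (List.mem_cons_of_mem _ hx))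
    · simp [pvPurge, hb]

theorem pvBridge (k : Int) (E : List (Int × String)) (qp ql : List Int) (c : Int)
    (hone : qp = [] ∨ ql = [])
    (hqp : ∀ x ∈ qp, ∀ e ∈ E, x < e.1)
    (hql : ∀ x ∈ ql, ∀ e ∈ E, x < e.1)
    (hE : E.Pairwise (fun a b => a.1 < b.1)) :
    (E.foldl (pvStep k) (qp, ql, c)).2.2 = c + pvTp k (ql ++ pvLF E) (qp ++ pvPF E) := by
  induction E generalizing qp ql c with
  | nil =>
    rcases hone with h | h <;> subst h
    · simp [pvLF, pvPF, pvTp_nil_right]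
    · simp only [List.foldl_nil, pvLF, pvPF, List.filterMap_nil, List.append_nil]
      cases qp <;> simp [pvTp]
  | cons e E ih =>
    obtain ⟨i, ch⟩ := e
    rw [List.pairwise_cons] at hE
    have hqp' : ∀ x ∈ qp, x < i := fun x hx => hqp x hx (i, ch) (by simp)
    have hql' : ∀ x ∈ ql, x < i := fun x hx => hql x hx (i, ch) (by simp)
    have hqpE : ∀ x ∈ qp, ∀ e ∈ E, x < e.1 := fun x hx e he => hqp x hx e (by simp [he])
    have hqlE : ∀ x ∈ ql, ∀ e ∈ E, x < e.1 := fun x hx e he => hql x hx e (by simp [he])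
    have hiE : ∀ e ∈ E, (i : Int) < e.1 := fun e he => hE.1 e he
    by_cases hP : ch = "P"
    · subst hP
      have hPF : pvPF ((i, "P") :: E) = i :: pvPF E := by simp [pvPF]
      have hLF : pvLF ((i, "P") :: E) = pvLF E := by simp [pvLF]
      rw [hPF, hLF]
      by_cases hqle : ql = []
      · subst hqle
        have hstep : pvStep k (qp, [], c) (i, "P") = (qp ++ [i], [], c) := by
          simp [pvStep, pvPurge]
        rw [List.foldl_cons, hstep,
          ih (qp ++ [i]) [] c (Or.inr rfl)
            (by intro x hx e he
                rcases List.mem_append.mp hx with h1 | h1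
                · exact hqpE x h1 e he
                · simp at h1; subst h1; exact hiE e he)
            (by simp) hE.2]
        simp
      · have hqp0 : qp = [] := hone.resolve_right hqle
        subst hqp0
        try simp only [List.nil_append]
        rw [pvPurgeL i k ql (pvLF E) (pvPF E) hql']
        rcases hpu : pvPurge (i - k) ql with _ | ⟨a, rest⟩
        · have hstep : pvStep k ([], ql, c) (i, "P") = ([i], [], c) := by
            simp [pvStep, hpu]
          rw [List.foldl_cons, hstep,
            ih [i] [] c (Or.inr rfl)
              (by intro x hx e he; simp at hx; subst hx; exact hiE e he)
              (by simp) hE.2]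
          simp
        · have hstep : pvStep k ([], ql, c) (i, "P") = ([], rest, c + 1) := by
            simp [pvStep, hpu]
          have ha1 : ¬ a < i - k := pvPurge_head_ge hpu
          have ha2 : a < i := hql' a (pvPurge_mem (hpu ▸ List.mem_cons_self))
          have habs : |a - i| ≤ k := by rw [abs_sub_comm, abs_of_pos (by omega)]; omega
          rw [List.foldl_cons, hstep,
            ih [] rest (c + 1) (Or.inl rfl) (by simp)
              (by intro x hx e he
                  exact hqlE x (pvPurge_mem (hpu ▸ List.mem_cons_of_mem a hx)) e he)
              hE.2]
          simp only [List.cons_append, pvTp, if_pos habs, List.nil_append]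
          ring
    · by_cases hL : ch = "L"
      · subst hL
        have hPF : pvPF ((i, "L") :: E) = pvPF E := by simp [pvPF]
        have hLF : pvLF ((i, "L") :: E) = i :: pvLF E := by simp [pvLF]
        rw [hPF, hLF]
        by_cases hqpe : qp = []
        · subst hqpe
          have hstep : pvStep k ([], ql, c) (i, "L") = ([], ql ++ [i], c) := by
            simp [pvStep, pvPurge]
          rw [List.foldl_cons, hstep,
            ih [] (ql ++ [i]) c (Or.inl rfl) (by simp)
              (by intro x hx e he
                  rcases List.mem_append.mp hx with h1 | h1
                  · exact hqlE x h1 e he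
                  · simp at h1; subst h1; exact hiE e he)
              hE.2]
          simp
        · have hql0 : ql = [] := hone.resolve_left hqpe
          subst hql0
          try simp only [List.nil_append]
          rw [pvPurgeP i k qp (pvLF E) (pvPF E) hqp']
          rcases hpu : pvPurge (i - k) qp with _ | ⟨b, rest⟩
          · have hstep : pvStep k (qp, [], c) (i, "L") = ([], [i], c) := by
              simp [pvStep, hpu]
            rw [List.foldl_cons, hstep,
              ih [] [i] c (Or.inl rfl) (by simp)
                (by intro x hx e he; simp at hx; subst hx; exact hiE e he) hE.2]
            simp
          · have hstep : pvStep k (qp, [], c) (i, "L") = (rest, [], c + 1) := by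
              simp [pvStep, hpu]
            have hb1 : ¬ b < i - k := pvPurge_head_ge hpu
            have hb2 : b < i := hqp' b (pvPurge_mem (hpu ▸ List.mem_cons_self))
            have habs : |i - b| ≤ k := by rw [abs_of_pos (by omega)]; omega
            rw [List.foldl_cons, hstep,
              ih rest [] (c + 1) (Or.inr rfl)
                (by intro x hx e he
                    exact hqpE x (pvPurge_mem (hpu ▸ List.mem_cons_of_mem b hx)) e he)
                (by simp) hE.2]
            simp only [List.cons_append, pvTp, if_pos habs, List.nil_append]
            ring
      · have hPF : pvPF ((i, ch) :: E) = pvPF E := by simp [pvPF, hP]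
        have hLF : pvLF ((i, ch) :: E) = pvLF E := by simp [pvLF, hL]
        have hstep : pvStep k (qp, ql, c) (i, ch) = (qp, ql, c) := by
          simp [pvStep, hP, hL]
        rw [hPF, hLF, List.foldl_cons, hstep, ih qp ql c hone hqpE hqlE hE.2]

-- ===== VERDICT (by name: the statement is the Claim_ definition above) =====
theorem Algoritmo_spec : Claim_equal_Algoritmo := by
  intro A k _
  unfold Spec_Algoritmo Algoritmo Algoritmo_alt
  rw [pvPhase1]
  simp only [List.nil_append]
  rw [pvLoop_eq_tp k _ _ _ 0 0 0 (by omega), List.drop_zero, List.drop_zero,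
    pvBridge k _ [] [] 0 (Or.inl rfl) (by simp) (by simp)
      (PySem.List.pairwise_lt_enumerate A 0)]
  simp
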